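-- pv_equiv track=rewrite | github.com/tkstanch/Megido | scanner/views.py | _extract_missing_header_impacts
-- ===== SOURCE A (Python) =====
-- def _extract_missing_header_impacts(evidence: str) -> list:
--     """
--     Parse evidence text for security_misconfig to extract missing header names
--     and return short impact phrases for each.
--
--     Args:
--         evidence: Evidence string from a security_misconfig vulnerability
--
--     Returns:
--         List of short impact strings, one per identified missing header
--     """
--     _HEADER_IMPACT = {
--         'content-security-policy': 'Missing Content-Security-Policy allows arbitrary script execution',
--         'csp': 'Missing Content-Security-Policy allows arbitrary script execution',
--         'x-frame-options': 'Missing X-Frame-Options enables clickjacking via transparent iframes',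
--         'x-content-type-options': 'Missing X-Content-Type-Options enables MIME-type confusion attacks',
--         'strict-transport-security': 'Missing HSTS permits HTTP downgrade and man-in-the-middle attacks',
--         'hsts': 'Missing HSTS permits HTTP downgrade and man-in-the-middle attacks',
--         'referrer-policy': 'Missing Referrer-Policy leaks sensitive URLs to third parties',
--         'permissions-policy': 'Missing Permissions-Policy allows unrestricted browser feature access',
--         'feature-policy': 'Missing Permissions-Policy allows unrestricted browser feature access',
--         'x-xss-protection': 'Missing X-XSS-Protection disables legacy browser XSS filter',
--     }
--     found = []
--     seen = set()
--     evidence_lower = evidence.lower()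
--     for header_key, impact_phrase in _HEADER_IMPACT.items():
--         if header_key in evidence_lower and impact_phrase not in seen:
--             seen.add(impact_phrase)
--             found.append(impact_phrase)
--     return found
-- ===== SOURCE B (Python) =====
-- def _extract_missing_header_impacts(evidence: str) -> list:
--     # Phrase-major grouped table: each unique impact phrase with all header
--     # aliases that produce it (first-occurrence order of A's dict preserved).
--     _IMPACT_ALIASES = [
--         ('Missing Content-Security-Policy allows arbitrary script execution',
--          ('content-security-policy', 'csp')),
--         ('Missing X-Frame-Options enables clickjacking via transparent iframes',
--          ('x-frame-options',)),
--         ('Missing X-Content-Type-Options enables MIME-type confusion attacks',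
--          ('x-content-type-options',)),
--         ('Missing HSTS permits HTTP downgrade and man-in-the-middle attacks',
--          ('strict-transport-security', 'hsts')),
--         ('Missing Referrer-Policy leaks sensitive URLs to third parties',
--          ('referrer-policy',)),
--         ('Missing Permissions-Policy allows unrestricted browser feature access',
--          ('permissions-policy', 'feature-policy')),
--         ('Missing X-XSS-Protection disables legacy browser XSS filter',
--          ('x-xss-protection',)),
--     ]
--     evidence_lower = evidence.lower()
--     return [phrase for phrase, aliases in _IMPACT_ALIASES
--             if any(alias in evidence_lower for alias in aliases)]
-- ===== Notes on version B (the rewrite author's own statement) =====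
-- stated objective: simpler
-- what changed: B inverts the header-to-phrase dict into a phrase-major table of unique phrases with their alias tuples, so the result is a single filter (keep a phrase if any alias occurs in the lowercased evidence) with no deduplication state.
import Mathlib
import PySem

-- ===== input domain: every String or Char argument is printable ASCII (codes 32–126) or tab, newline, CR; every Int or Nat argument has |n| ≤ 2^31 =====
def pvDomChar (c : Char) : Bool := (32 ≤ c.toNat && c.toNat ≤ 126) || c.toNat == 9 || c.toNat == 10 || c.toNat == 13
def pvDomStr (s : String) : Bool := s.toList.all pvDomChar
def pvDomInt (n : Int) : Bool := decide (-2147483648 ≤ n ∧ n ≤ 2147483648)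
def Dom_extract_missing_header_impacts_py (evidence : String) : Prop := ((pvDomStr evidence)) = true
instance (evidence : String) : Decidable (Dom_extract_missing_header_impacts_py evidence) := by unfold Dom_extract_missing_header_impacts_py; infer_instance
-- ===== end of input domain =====

-- B replaces A's header-by-header scan with a dedup 'seen' set by a phrase-major
-- grouped table of unique phrases, each filtered in by any-alias substring match (simpler).


-- ===== PORT A =====
-- the _HEADER_IMPACT dict literal (distinct keys, insertion order = items order)
def headerImpactA : List (String × String) :=
  [("content-security-policy", "Missing Content-Security-Policy allows arbitrary script execution"),
   ("csp", "Missing Content-Security-Policy allows arbitrary script execution"),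
   ("x-frame-options", "Missing X-Frame-Options enables clickjacking via transparent iframes"),
   ("x-content-type-options", "Missing X-Content-Type-Options enables MIME-type confusion attacks"),
   ("strict-transport-security", "Missing HSTS permits HTTP downgrade and man-in-the-middle attacks"),
   ("hsts", "Missing HSTS permits HTTP downgrade and man-in-the-middle attacks"),
   ("referrer-policy", "Missing Referrer-Policy leaks sensitive URLs to third parties"),
   ("permissions-policy", "Missing Permissions-Policy allows unrestricted browser feature access"),
   ("feature-policy", "Missing Permissions-Policy allows unrestricted browser feature access"),
   ("x-xss-protection", "Missing X-XSS-Protection disables legacy browser XSS filter")]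

def extract_missing_header_impacts_py (evidence : String) : List String :=
  let evidence_lower := PySem.Str.lower evidence
  let st := headerImpactA.foldl
    (fun (st : List String × PySem.Set String) item =>
      if PySem.Str.isIn item.1 evidence_lower && !(PySem.Set.contains st.2 item.2) then
        (st.1 ++ [item.2], PySem.Set.add st.2 item.2)
      else st)
    ([], PySem.Set.empty)
  st.1

-- ===== PORT B =====
-- phrase-major table: each unique impact phrase with its header aliases
def impactAliasesB : List (String × List String) :=
  [("Missing Content-Security-Policy allows arbitrary script execution",
      ["content-security-policy", "csp"]),
   ("Missing X-Frame-Options enables clickjacking via transparent iframes",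
      ["x-frame-options"]),
   ("Missing X-Content-Type-Options enables MIME-type confusion attacks",
      ["x-content-type-options"]),
   ("Missing HSTS permits HTTP downgrade and man-in-the-middle attacks",
      ["strict-transport-security", "hsts"]),
   ("Missing Referrer-Policy leaks sensitive URLs to third parties",
      ["referrer-policy"]),
   ("Missing Permissions-Policy allows unrestricted browser feature access",
      ["permissions-policy", "feature-policy"]),
   ("Missing X-XSS-Protection disables legacy browser XSS filter",
      ["x-xss-protection"])]

def extract_missing_header_impacts_py_alt (evidence : String) : List String :=
  let evidence_lower := PySem.Str.lower evidence
  (impactAliasesB.filter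
    (fun g => g.2.any (fun al => PySem.Str.isIn al evidence_lower))).map (·.1)

-- ===== PRECONDITION & SPEC =====
def Spec_extract_missing_header_impacts_py (evidence : String) (out : List String) : Prop := out = extract_missing_header_impacts_py_alt evidence
instance (evidence : String) (out : List String) : Decidable (Spec_extract_missing_header_impacts_py evidence out) := by unfold Spec_extract_missing_header_impacts_py; infer_instance

-- ===== CLAIM (what is proved, stated in full; the proofs are below) =====
def Claim_equal_extract_missing_header_impacts_py : Prop := ∀ (evidence : String), Dom_extract_missing_header_impacts_py evidence → Spec_extract_missing_header_impacts_py evidence (extract_missing_header_impacts_py evidence)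


-- ===== LEMMAS AND PROOFS =====

-- proof-only helpers: both results as functions of the ten substring-test booleans
def stepA (st : List String × PySem.Set String) (item : Bool × String) : List String × PySem.Set String :=
  if item.1 && !(PySem.Set.contains st.2 item.2) then
    (st.1 ++ [item.2], PySem.Set.add st.2 item.2)
  else st

def coreA (b1 b2 b3 b4 b5 b6 b7 b8 b9 b10 : Bool) : List String :=
  (([(b1, "Missing Content-Security-Policy allows arbitrary script execution"),
     (b2, "Missing Content-Security-Policy allows arbitrary script execution"),
     (b3, "Missing X-Frame-Options enables clickjacking via transparent iframes"),
     (b4, "Missing X-Content-Type-Options enables MIME-type confusion attacks"),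
     (b5, "Missing HSTS permits HTTP downgrade and man-in-the-middle attacks"),
     (b6, "Missing HSTS permits HTTP downgrade and man-in-the-middle attacks"),
     (b7, "Missing Referrer-Policy leaks sensitive URLs to third parties"),
     (b8, "Missing Permissions-Policy allows unrestricted browser feature access"),
     (b9, "Missing Permissions-Policy allows unrestricted browser feature access"),
     (b10, "Missing X-XSS-Protection disables legacy browser XSS filter")] : List (Bool × String)).foldl
    stepA ([], PySem.Set.empty)).1

def coreB (b1 b2 b3 b4 b5 b6 b7 b8 b9 b10 : Bool) : List String :=
  (([("Missing Content-Security-Policy allows arbitrary script execution", [b1, b2]),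
     ("Missing X-Frame-Options enables clickjacking via transparent iframes", [b3]),
     ("Missing X-Content-Type-Options enables MIME-type confusion attacks", [b4]),
     ("Missing HSTS permits HTTP downgrade and man-in-the-middle attacks", [b5, b6]),
     ("Missing Referrer-Policy leaks sensitive URLs to third parties", [b7]),
     ("Missing Permissions-Policy allows unrestricted browser feature access", [b8, b9]),
     ("Missing X-XSS-Protection disables legacy browser XSS filter", [b10])] : List (String × List Bool)).filter
    (fun g => g.2.any id)).map (·.1)

theorem foldA_map (el : String) (l : List (String × String)) (st : List String × PySem.Set String) :
    l.foldl (fun st item =>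
        if PySem.Str.isIn item.1 el && !(PySem.Set.contains st.2 item.2) then
          (st.1 ++ [item.2], PySem.Set.add st.2 item.2)
        else st) st
      = (l.map (fun kv => (PySem.Str.isIn kv.1 el, kv.2))).foldl stepA st := by
  induction l generalizing st with
  | nil => rfl
  | cons a l ih => simp only [List.foldl_cons, List.map_cons, ih, stepA]

theorem filtB_map (el : String) (l : List (String × List String)) :
    (l.filter (fun g => g.2.any (fun al => PySem.Str.isIn al el))).map (·.1)
      = ((l.map (fun g => (g.1, g.2.map (fun al => PySem.Str.isIn al el)))).filter
          (fun g => g.2.any id)).map (·.1) := by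
  induction l with
  | nil => rfl
  | cons a l ih =>
      by_cases h : ∃ x ∈ a.2, PySem.Chars.isIn x.toList el.toList = true <;>
        simp [List.any_map, h] <;> simpa using ih

theorem coreA_eq_A (evidence : String) :
    extract_missing_header_impacts_py evidence =
      coreA (PySem.Str.isIn "content-security-policy" (PySem.Str.lower evidence))
            (PySem.Str.isIn "csp" (PySem.Str.lower evidence))
            (PySem.Str.isIn "x-frame-options" (PySem.Str.lower evidence))
            (PySem.Str.isIn "x-content-type-options" (PySem.Str.lower evidence))
            (PySem.Str.isIn "strict-transport-security" (PySem.Str.lower evidence))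
            (PySem.Str.isIn "hsts" (PySem.Str.lower evidence))
            (PySem.Str.isIn "referrer-policy" (PySem.Str.lower evidence))
            (PySem.Str.isIn "permissions-policy" (PySem.Str.lower evidence))
            (PySem.Str.isIn "feature-policy" (PySem.Str.lower evidence))
            (PySem.Str.isIn "x-xss-protection" (PySem.Str.lower evidence)) := by
  simp only [extract_missing_header_impacts_py, coreA]
  rw [foldA_map]
  simp only [headerImpactA, List.map_cons, List.map_nil]

theorem coreB_eq_B (evidence : String) :
    extract_missing_header_impacts_py_alt evidence =
      coreB (PySem.Str.isIn "content-security-policy" (PySem.Str.lower evidence))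
            (PySem.Str.isIn "csp" (PySem.Str.lower evidence))
            (PySem.Str.isIn "x-frame-options" (PySem.Str.lower evidence))
            (PySem.Str.isIn "x-content-type-options" (PySem.Str.lower evidence))
            (PySem.Str.isIn "strict-transport-security" (PySem.Str.lower evidence))
            (PySem.Str.isIn "hsts" (PySem.Str.lower evidence))
            (PySem.Str.isIn "referrer-policy" (PySem.Str.lower evidence))
            (PySem.Str.isIn "permissions-policy" (PySem.Str.lower evidence))
            (PySem.Str.isIn "feature-policy" (PySem.Str.lower evidence))
            (PySem.Str.isIn "x-xss-protection" (PySem.Str.lower evidence)) := by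
  simp only [extract_missing_header_impacts_py_alt, coreB]
  rw [filtB_map]
  simp only [impactAliasesB, List.map_cons, List.map_nil]

theorem core_eq : ∀ b1 b2 b3 b4 b5 b6 b7 b8 b9 b10 : Bool,
    coreA b1 b2 b3 b4 b5 b6 b7 b8 b9 b10 = coreB b1 b2 b3 b4 b5 b6 b7 b8 b9 b10 := by decide

-- ===== VERDICT (by name: the statement is the Claim_ definition above) =====
theorem extract_missing_header_impacts_py_spec : Claim_equal_extract_missing_header_impacts_py := by
  intro evidence _
  unfold Spec_extract_missing_header_impacts_py
  rw [coreA_eq_A, coreB_eq_B]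
  exact core_eq _ _ _ _ _ _ _ _ _ _
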